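-- pv_equiv track=rewrite | github.com/alexandraback/datacollection | solutions_5631989306621952_1/Python/knabbers/A.py | f
-- ===== SOURCE A (Python) =====
-- def f(s):
-- 	if len(s) <= 1:
-- 		return s
--
-- 	mx = max(s)
-- 	r=[]
-- 	pre=[]
-- 	post=[]
-- 	rdone=False
-- 	for c in s:
-- 		if c>=mx or rdone:
-- 			rdone = True
-- 			if c==mx:
-- 				pre.append(c)
-- 			else:
-- 				post.append(c)
-- 		else:
-- 			r.append(c)
--
-- 	return pre + f(r) + post
-- ===== SOURCE B (Python) =====
-- def f(s):
--     # One left-to-right pass: each strict running-max record opens a new segment;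
--     # within a segment, copies of the record value and the other elements are kept apart.
--     cur = None
--     pres = []   # pres[k]: copies of the k-th record value in its segment
--     posts = []  # posts[k]: the other elements of the k-th segment
--     for c in s:
--         if cur is None or c > cur:
--             cur = c
--             pres.append([c])
--             posts.append([])
--         elif c == cur:
--             pres[-1].append(c)
--         else:
--             posts[-1].append(c)
--     out = []
--     for p in reversed(pres):
--         out.extend(p)
--     for q in posts:
--         out.extend(q)
--     return out
-- ===== Notes on version B (the rewrite author's own statement) =====
-- stated objective: faster
-- what changed: replaces the recursive peel-off-the-maximum scheme (recompute max and rescan the remaining prefix at every level) by a single left-to-right pass that opens a segment at each strict running-max record and finally concatenates the record-copies back-to-front and the leftovers front-to-back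
import Mathlib
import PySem

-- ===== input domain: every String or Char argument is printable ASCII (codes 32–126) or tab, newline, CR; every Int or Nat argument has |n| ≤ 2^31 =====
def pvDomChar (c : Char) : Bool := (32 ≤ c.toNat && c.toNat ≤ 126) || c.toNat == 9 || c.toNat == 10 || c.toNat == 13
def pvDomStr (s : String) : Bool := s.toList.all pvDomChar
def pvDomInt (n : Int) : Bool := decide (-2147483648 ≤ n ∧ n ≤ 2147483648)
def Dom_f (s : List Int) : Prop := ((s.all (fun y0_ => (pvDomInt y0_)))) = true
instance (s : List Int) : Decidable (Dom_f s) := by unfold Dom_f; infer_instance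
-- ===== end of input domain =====

-- B replaces A's recursive peel-off-the-maximum scheme by one linear pass over running-max
-- record segments; faster (A rescans the remaining prefix at every recursion level).

-- ===== PORT A =====
-- loop body of A: state (r, pre, post, rdone)
def fStep (mx : Int) (st : List Int × List Int × List Int × Bool) (c : Int) :
    List Int × List Int × List Int × Bool :=
  let (r, pre, post, rdone) := st
  if mx ≤ c || rdone then
    if c == mx then (r, pre ++ [c], post, true)
    else (r, pre, post ++ [c], true)
  else (r ++ [c], pre, post, rdone)

-- characterisation of A's loop, needed for termination of f (proved below the port-A helper,
-- cited by name in decreasing_by)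
theorem fStep_foldl_done (mx : Int) (t r0 pre0 post0 : List Int) :
    t.foldl (fStep mx) (r0, pre0, post0, true)
      = (r0, pre0 ++ t.filter (· == mx), post0 ++ t.filter (fun c => !(c == mx)), true) := by
  induction t generalizing pre0 post0 with
  | nil => simp
  | cons c t ih =>
    simp only [List.foldl_cons, fStep, Bool.or_true, if_true, List.filter_cons]
    by_cases h : c = mx
    · simp [h, ih]
    · simp [h, ih]

theorem fStep_foldl (mx : Int) (t r0 pre0 post0 : List Int) :
    t.foldl (fStep mx) (r0, pre0, post0, false)
      = (r0 ++ t.takeWhile (fun c => !(mx ≤ c)),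
         pre0 ++ (t.dropWhile (fun c => !(mx ≤ c))).filter (· == mx),
         post0 ++ (t.dropWhile (fun c => !(mx ≤ c))).filter (fun c => !(c == mx)),
         !(t.dropWhile (fun c => !(mx ≤ c))).isEmpty) := by
  induction t generalizing r0 with
  | nil => simp
  | cons c t ih =>
    by_cases h : mx ≤ c
    · simp only [List.foldl_cons, fStep, List.takeWhile_cons, List.dropWhile_cons, h,
        decide_true, Bool.not_true, Bool.false_or, if_false, List.filter_cons]
      by_cases hc : c = mx
      · simp [hc, fStep_foldl_done]
      · simp [hc, fStep_foldl_done]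
    · simp only [List.foldl_cons, fStep, List.takeWhile_cons, List.dropWhile_cons, h,
        decide_false, Bool.not_false, Bool.false_or, if_true, Bool.or_false]
      rw [if_neg (by simp [h]), ih]
      simp

theorem fRec_length (mx : Int) (s : List Int) (hmem : mx ∈ s) :
    (s.takeWhile (fun c => !(mx ≤ c))).length < s.length := by
  have hpre : (s.takeWhile (fun c => !(mx ≤ c))) <+: s := List.takeWhile_prefix _
  rcases lt_or_eq_of_le hpre.length_le with h | h
  · exact h
  · exfalso
    have heq := hpre.eq_of_length h
    have := List.takeWhile_eq_self_iff.mp heq mx hmem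
    simp at this
  
def f (s : List Int) : List Int :=
  if s.length ≤ 1 then s
  else
    let mx := (PySem.List.max? s (fun x => x)).getD 0   -- max(s); s ≠ [] here so max? = some
    let st := s.foldl (fStep mx) ([], [], [], false)
    st.2.1 ++ f st.1 ++ st.2.2.1
termination_by s.length
decreasing_by
  rename_i h
  have hne : s ≠ [] := by
    cases s with
    | nil => simp at h
    | cons a t => simp
  obtain ⟨m, hm⟩ : ∃ m, PySem.List.max? s (fun x : Int => x) = some m := by
    cases hmo : PySem.List.max? s (fun x : Int => x) with
    | none => exact absurd ((PySem.List.max?_eq_none_iff s (fun x => x)).mp hmo) hne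
    | some m => exact ⟨m, rfl⟩
  simp only [List.foldl_attach, fStep_foldl, List.nil_append, hm, Option.getD_some]
  exact fRec_length m s (PySem.List.max?_mem hm)

-- ===== PORT B =====
-- loop body of B: state (cur, pres, posts); pres/posts keep the newest segment FIRST and each
-- segment reversed (the fold representation of python's append / pres[-1].append)
def bStep : Option Int × List (List Int) × List (List Int) → Int →
    Option Int × List (List Int) × List (List Int)
  | (none, pres, posts), c => (some c, [c] :: pres, ([] : List Int) :: posts)
  | (some m, pres, posts), c =>
    if m < c then (some c, [c] :: pres, ([] : List Int) :: posts)
    else if c == m then (some m, (c :: pres.headD []) :: pres.tail, posts)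
    else (some m, pres, (c :: posts.headD []) :: posts.tail)

-- out: record-copies newest segment first, leftovers oldest segment first
def bAssemble (st : Option Int × List (List Int) × List (List Int)) : List Int :=
  (st.2.1.map List.reverse).flatten ++ ((st.2.2.map List.reverse).reverse).flatten

def f_alt (s : List Int) : List Int :=
  bAssemble (s.foldl bStep (none, [], []))

-- ===== PRECONDITION & SPEC =====
def Spec_f (s : List Int) (out : List Int) : Prop := out = f_alt s
instance (s : List Int) (out : List Int) : Decidable (Spec_f s out) := by unfold Spec_f; infer_instance

-- ===== CLAIM (what is proved, stated in full; the proofs are below) =====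
def Claim_equal_f : Prop := ∀ (s : List Int), Dom_f s → Spec_f s (f s)

-- ===== LEMMAS AND PROOFS =====

-- B's cur tracks the running maximum: if every element is < mx and cur starts none or < mx, it stays so
theorem bStep_cur_lt (mx : Int) (t : List Int) (ht : ∀ c ∈ t, c < mx) :
    ∀ st : Option Int × List (List Int) × List (List Int),
      (st.1 = none ∨ ∃ m, st.1 = some m ∧ m < mx) →
      ((t.foldl bStep st).1 = none ∨ ∃ m, (t.foldl bStep st).1 = some m ∧ m < mx) := by
  induction t with
  | nil => intro st h; simpa using h
  | cons c t ih =>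
    intro st h
    have hc : c < mx := ht c (by simp)
    have ht' : ∀ x ∈ t, x < mx := fun x hx => ht x (by simp [hx])
    simp only [List.foldl_cons]
    apply ih ht'
    rcases h with h | ⟨m, hm, hlt⟩
    · obtain ⟨_, pres, posts⟩ := st
      simp_all [bStep]
    · obtain ⟨o, pres, posts⟩ := st
      simp only at hm; subst hm
      simp only [bStep]
      split_ifs with h1 h2
      · exact Or.inr ⟨c, rfl, hc⟩
      · exact Or.inr ⟨m, rfl, hlt⟩
      · exact Or.inr ⟨m, rfl, hlt⟩

-- once cur = m is the global max, the rest of the list only fills the newest segment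
theorem bStep_foldl_done (m : Int) (t : List Int) :
    ∀ (p q : List Int) (ps qs : List (List Int)), (∀ c ∈ t, c ≤ m) →
    t.foldl bStep (some m, p :: ps, q :: qs)
      = (some m, ((t.filter (· == m)).reverse ++ p) :: ps,
                 ((t.filter (fun c => !(c == m))).reverse ++ q) :: qs) := by
  induction t with
  | nil => simp
  | cons c t ih =>
    intro p q ps qs ht
    have hc : c ≤ m := ht c (by simp)
    have ht' : ∀ x ∈ t, x ≤ m := fun x hx => ht x (by simp [hx])
    simp only [List.foldl_cons, bStep, if_neg (not_lt.mpr hc), List.filter_cons]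
    by_cases h : c = m
    · simp [h, ih _ _ _ _ ht']
    · simp [h, ih _ _ _ _ ht']

theorem f_alt_nil : f_alt [] = [] := by simp [f_alt, bAssemble]

theorem f_alt_single (a : Int) : f_alt [a] = [a] := by
  simp [f_alt, bAssemble, bStep]

-- if the head of dropWhile exists, it fails the predicate
theorem dropWhile_head_false {p : Int → Bool} :
    ∀ (l : List Int) {h : Int} {t : List Int}, l.dropWhile p = h :: t → p h = false := by
  intro l
  induction l with
  | nil => intro h t hh; simp at hh
  | cons a l ih =>
    intro h t hh
    by_cases hp : p a
    · rw [List.dropWhile_cons_of_pos hp] at hh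
      exact ih hh
    · rw [List.dropWhile_cons_of_neg hp] at hh
      cases hh
      simpa using hp

-- the recurrence A computes, satisfied by f_alt
theorem f_alt_rec (s : List Int) (mx : Int) (hmx : PySem.List.max? s (fun x => x) = some mx) :
    f_alt s = (s.dropWhile (fun c => !(mx ≤ c))).filter (· == mx)
      ++ f_alt (s.takeWhile (fun c => !(mx ≤ c)))
      ++ (s.dropWhile (fun c => !(mx ≤ c))).filter (fun c => !(c == mx)) := by
  have hmem : mx ∈ s := PySem.List.max?_mem hmx
  have hmax : ∀ y ∈ s, y ≤ mx := by
    intro y hy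
    simpa using PySem.List.max?_isMax hmx y hy
  set p : Int → Bool := fun c => !(mx ≤ c) with hp
  have hsplit : s.takeWhile p ++ s.dropWhile p = s := List.takeWhile_append_dropWhile
  -- the drop part starts with mx
  obtain ⟨d2, hd⟩ : ∃ d2, s.dropWhile p = mx :: d2 := by
    cases hdd : s.dropWhile p with
    | nil =>
      exfalso
      have hts : s.takeWhile p = s := by
        have := hsplit; rw [hdd] at this; simpa using this
      have := List.takeWhile_eq_self_iff.mp hts mx hmem
      simp [hp] at this
    | cons h d2 =>
      have hh : p h = false := dropWhile_head_false s hdd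
      have hhs : h ∈ s := (List.dropWhile_subset p) (by simp [hdd])
      have h1 : mx ≤ h := by simpa [hp] using hh
      have heq : h = mx := le_antisymm (hmax h hhs) h1
      exact ⟨d2, by simp [hdd, heq]⟩
  have hrlt : ∀ c ∈ s.takeWhile p, c < mx := by
    intro c hc
    have := List.mem_takeWhile_imp hc
    simp only [hp, Bool.not_eq_eq_eq_not, Bool.not_true, decide_eq_false_iff_not, not_le] at this
    exact this
  have hd2le : ∀ c ∈ d2, c ≤ mx := by
    intro c hc
    exact hmax c ((List.dropWhile_subset p) (by simp [hd, hc]))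
  -- split the fold at the first maximum
  have hfold : s.foldl bStep (none, [], []) =
      (s.dropWhile p).foldl bStep ((s.takeWhile p).foldl bStep (none, [], [])) := by
    conv_lhs => rw [← hsplit]
    rw [List.foldl_append]
  rcases hst : (s.takeWhile p).foldl bStep (none, [], []) with ⟨curR, presR, postsR⟩
  have hcur := bStep_cur_lt mx (s.takeWhile p) hrlt (none, [], []) (Or.inl rfl)
  rw [hst] at hcur
  have hstep : bStep (curR, presR, postsR) mx
      = (some mx, [mx] :: presR, ([] : List Int) :: postsR) := by
    rcases hcur with h | ⟨m, hm, hlt⟩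
    · simp only at h; subst h; rfl
    · simp only at hm; subst hm; simp [bStep, hlt]
  have hfin : s.foldl bStep (none, [], [])
      = (some mx, ((d2.filter (· == mx)).reverse ++ [mx]) :: presR,
         ((d2.filter (fun c => !(c == mx))).reverse ++ []) :: postsR) := by
    rw [hfold, hd, List.foldl_cons, hst, hstep,
      bStep_foldl_done mx d2 [mx] [] presR postsR hd2le]
  show bAssemble (s.foldl bStep (none, [], [])) = _
  rw [hfin, hd]
  show _ = _ ++ bAssemble ((s.takeWhile p).foldl bStep (none, [], [])) ++ _
  rw [hst]
  simp [bAssemble, List.reverse_append, List.append_assoc]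

theorem f_eq_f_alt : ∀ s : List Int, f s = f_alt s := by
  have key : ∀ (n : Nat) (s : List Int), s.length ≤ n → f s = f_alt s := by
    intro n
    induction n with
    | zero =>
      intro s hs
      have hnil : s = [] := List.eq_nil_of_length_eq_zero (Nat.le_zero.mp hs)
      subst hnil
      rw [f, f_alt_nil]
      simp
    | succ n ih =>
      intro s hs
      by_cases h1 : s.length ≤ 1
      · cases s with
        | nil => rw [f, f_alt_nil]; simp
        | cons a t =>
          cases t with
          | nil => rw [f, f_alt_single]; simp
          | cons b t => simp at h1
      · have hne : s ≠ [] := by intro h; rw [h] at h1; simp at h1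
        obtain ⟨mx, hmx⟩ : ∃ m, PySem.List.max? s (fun x : Int => x) = some m := by
          cases hmo : PySem.List.max? s (fun x : Int => x) with
          | none => exact absurd ((PySem.List.max?_eq_none_iff s (fun x => x)).mp hmo) hne
          | some m => exact ⟨m, rfl⟩
        have hlen : (s.takeWhile (fun c => !(mx ≤ c))).length ≤ n := by
          have := fRec_length mx s (PySem.List.max?_mem hmx)
          omega
        rw [f]
        simp only [if_neg h1, hmx, Option.getD_some, fStep_foldl, List.nil_append]
        rw [ih _ hlen, f_alt_rec s mx hmx]
  intro s
  exact key s.length s le_rfl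

-- ===== VERDICT (by name: the statement is the Claim_ definition above) =====
theorem f_spec : Claim_equal_f := by
  intro s _
  unfold Spec_f
  exact f_eq_f_alt s
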